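-- pv_equiv track=rewrite | github.com/ArseniiMaiorov/AGROSIGNAL | backend/services/temporal_analytics_service.py | _actual_range_from_series
-- ===== SOURCE A (Python) =====
-- from typing import Any
--
-- def _actual_range_from_series(weekly_series: dict[str, list[dict[str, Any]]]) -> dict[str, str | None]:
--     all_dates = [
--         str(point.get("observed_at"))
--         for points in weekly_series.values()
--         for point in points
--         if point.get("observed_at")
--     ]
--     if not all_dates:
--         return {"date_from": None, "date_to": None}
--     return {"date_from": min(all_dates), "date_to": max(all_dates)}
-- ===== SOURCE B (Python) =====
-- def _actual_range_from_series(weekly_series):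
--     dates = []
--     for points in weekly_series.values():
--         for point in points:
--             value = point.get("observed_at")
--             if value:
--                 dates.append(str(value))
--     if not dates:
--         return {"date_from": None, "date_to": None}
--     dates.sort()
--     return {"date_from": dates[0], "date_to": dates[-1]}
-- ===== Notes on version B (the rewrite author's own statement) =====
-- stated objective: alternative
-- what changed: Collects the dates with an explicit accumulator loop instead of a comprehension, then sorts the list once and reads its two endpoints instead of running the separate min and max scans.
import Mathlib
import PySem

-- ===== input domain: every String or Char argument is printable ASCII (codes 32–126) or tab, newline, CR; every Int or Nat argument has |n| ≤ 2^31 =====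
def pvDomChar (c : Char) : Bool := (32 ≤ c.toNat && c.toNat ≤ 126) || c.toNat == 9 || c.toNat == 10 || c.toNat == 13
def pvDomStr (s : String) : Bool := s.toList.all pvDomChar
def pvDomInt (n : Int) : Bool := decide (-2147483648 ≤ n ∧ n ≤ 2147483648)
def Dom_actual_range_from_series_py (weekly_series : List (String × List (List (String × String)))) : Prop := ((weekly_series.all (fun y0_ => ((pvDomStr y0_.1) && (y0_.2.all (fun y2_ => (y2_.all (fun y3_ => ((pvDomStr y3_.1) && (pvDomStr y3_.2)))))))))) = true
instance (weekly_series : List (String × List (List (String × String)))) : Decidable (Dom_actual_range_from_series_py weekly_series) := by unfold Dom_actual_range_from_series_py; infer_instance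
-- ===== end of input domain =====

-- B collects the dates with an accumulator loop, sorts once and reads the endpoints, instead of A's comprehension plus separate min/max scans.
-- ===== PORT A =====
def actual_range_from_series_py (weekly_series : List (String × List (List (String × String)))) : List (String × Option String) :=
  let all_dates : List String :=
    (weekly_series.map Prod.snd).flatMap (fun points =>
      points.filterMap (fun point =>
        match (PySem.Dict.mk point).get? "observed_at" with
        | some s => if s = "" then none else some s   -- 'if point.get("observed_at")': truthy strings only; str(s) = s
        | none => none))
  if all_dates = [] then [("date_from", none), ("date_to", none)]
  else [("date_from", PySem.List.min? all_dates (fun x => x)),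
        ("date_to", PySem.List.max? all_dates (fun x => x))]

-- ===== PORT B =====
def pvAppendDate (acc : List String) (point : List (String × String)) : List String :=
  match (PySem.Dict.mk point).get? "observed_at" with
  | some v => if v = "" then acc else acc ++ [v]   -- 'if value: dates.append(str(value))'
  | none => acc

def actual_range_from_series_py_alt (weekly_series : List (String × List (List (String × String)))) : List (String × Option String) :=
  let dates := weekly_series.foldl (fun acc kv => kv.2.foldl pvAppendDate acc) []
  if dates = [] then [("date_from", none), ("date_to", none)]
  else
    let sortedDates := PySem.List.sorted dates (fun x => x) false   -- 'dates.sort()'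
    [("date_from", sortedDates.head?), ("date_to", sortedDates.getLast?)]

-- ===== PRECONDITION & SPEC =====
def Spec_actual_range_from_series_py (weekly_series : List (String × List (List (String × String)))) (out : List (String × Option String)) : Prop := out = actual_range_from_series_py_alt weekly_series
instance (weekly_series : List (String × List (List (String × String)))) (out : List (String × Option String)) : Decidable (Spec_actual_range_from_series_py weekly_series out) := by unfold Spec_actual_range_from_series_py; infer_instance

-- ===== CLAIM =====
def Claim_equal_actual_range_from_series_py : Prop := ∀ (weekly_series : List (String × List (List (String × String)))), Dom_actual_range_from_series_py weekly_series → Spec_actual_range_from_series_py weekly_series (actual_range_from_series_py weekly_series)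

-- ===== LEMMAS AND PROOFS =====
def pvVal? (point : List (String × String)) : Option String :=
  match (PySem.Dict.mk point).get? "observed_at" with
  | some s => if s = "" then none else some s
  | none => none

-- B's accumulator loop builds exactly A's comprehension list
theorem pvAppend_eq (acc : List String) (point : List (String × String)) :
    pvAppendDate acc point = acc ++ (pvVal? point).toList := by
  simp only [pvAppendDate, pvVal?]
  cases (PySem.Dict.mk point).get? "observed_at" with
  | none => simp
  | some s => by_cases h : s = "" <;> simp [h]

theorem pvInner (points : List (List (String × String))) (acc : List String) :
    points.foldl pvAppendDate acc = acc ++ points.filterMap pvVal? := by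
  induction points generalizing acc with
  | nil => simp
  | cons p t ih =>
      rw [List.foldl_cons, pvAppend_eq, List.filterMap_cons, ih]
      cases pvVal? p <;> simp

theorem pvOuter (ws : List (String × List (List (String × String)))) (acc : List String) :
    ws.foldl (fun acc kv => kv.2.foldl pvAppendDate acc) acc
      = acc ++ (ws.map Prod.snd).flatMap (fun points => points.filterMap pvVal?) := by
  induction ws generalizing acc with
  | nil => simp
  | cons kv t ih => rw [List.foldl_cons, pvInner, ih, List.map_cons, List.flatMap_cons, List.append_assoc]

-- head of the sorted list is min (first extremum's VALUE is unique by antisymmetry)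
theorem pvHeadSorted (L : List String) (hL : L ≠ []) :
    (PySem.List.sorted L (fun x => x) false).head? = PySem.List.min? L (fun x => x) := by
  cases hS : PySem.List.sorted L (fun x => x) false with
  | nil => exact absurd (((PySem.List.sorted_eq_nil_iff L (fun x => x) false).mp hS)) hL
  | cons m t =>
      cases hm : PySem.List.min? L (fun x => x) with
      | none => exact absurd (((PySem.List.min?_eq_none_iff L (fun x => x)).mp hm)) hL
      | some m' =>
          have hmem : m ∈ L := (PySem.List.sorted_perm L (fun x => x) false).mem_iff.mp (by rw [hS]; simp)
          have h1 : m' ≤ m := PySem.List.min?_isMin hm m hmem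
          have h2 : m ≤ m' := PySem.List.key_head_sorted_le L (fun x => x) hS m' (PySem.List.min?_mem hm)
          simp [le_antisymm h1 h2]

-- last of the sorted list is max
theorem pvLastSorted (L : List String) (hL : L ≠ []) :
    (PySem.List.sorted L (fun x => x) false).getLast? = PySem.List.max? L (fun x => x) := by
  have hperm := PySem.List.sorted_perm L (fun x => x) false
  have hpw := PySem.List.sorted_pairwise L (fun x => x)
  cases hR : (PySem.List.sorted L (fun x => x) false).reverse with
  | nil =>
      have : PySem.List.sorted L (fun x => x) false = [] := by
        have := congrArg List.reverse hR; simpa using this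
      exact absurd (((PySem.List.sorted_eq_nil_iff L (fun x => x) false).mp this)) hL
  | cons M r =>
      cases hm : PySem.List.max? L (fun x => x) with
      | none => exact absurd (((PySem.List.max?_eq_none_iff L (fun x => x)).mp hm)) hL
      | some M' =>
          have hMmemS : M ∈ PySem.List.sorted L (fun x => x) false := by
            rw [← List.mem_reverse, hR]; simp
          have hMmem : M ∈ L := hperm.mem_iff.mp hMmemS
          have h1 : M ≤ M' := PySem.List.max?_isMax hm M hMmem
          have hpwr : (M :: r).Pairwise (fun a b => b ≤ a) := by
            rw [← hR]; exact (List.pairwise_reverse).mpr hpw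
          have hge : ∀ y ∈ PySem.List.sorted L (fun x => x) false, y ≤ M := by
            intro y hy
            rw [← List.mem_reverse, hR] at hy
            rcases List.mem_cons.mp hy with h | h
            · exact le_of_eq h
            · exact (List.pairwise_cons.mp hpwr).1 y h
          have h2 : M' ≤ M := hge M' (hperm.mem_iff.mpr (PySem.List.max?_mem hm))
          rw [List.getLast?_eq_head?_reverse, hR]
          simp [le_antisymm h1 h2]

-- ===== VERDICT =====
theorem actual_range_from_series_py_spec : Claim_equal_actual_range_from_series_py := by
  intro ws _
  unfold Spec_actual_range_from_series_py
  unfold actual_range_from_series_py actual_range_from_series_py_alt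
  rw [pvOuter, List.nil_append]
  set L := (ws.map Prod.snd).flatMap (fun points => points.filterMap pvVal?) with hL
  have hA : (ws.map Prod.snd).flatMap (fun points =>
      points.filterMap (fun point =>
        match (PySem.Dict.mk point).get? "observed_at" with
        | some s => if s = "" then none else some s
        | none => none)) = L := rfl
  rw [hA]
  by_cases h : L = []
  · simp [h]
  · simp only [if_neg h]
    rw [pvHeadSorted L h, pvLastSorted L h]
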